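-- pv_equiv track=rewrite | github.com/shartiniquais/plato-wordbox | finder.py | parse_board_chars
-- ===== SOURCE A (Python) =====
-- from typing import List, Set, Tuple
--
-- def parse_board_chars(chars: str, size: int) -> List[List[str]]:
--     """
--     Transforme la chaîne plate en grille 2D de chaînes (lettres ou digrammes).
--     Les majuscules indiquent le début d'un digramme (ex: 'Qu').
--     Retourne une liste de listes de chaînes en majuscules.
--     """
--     parsed: List[str] = []
--     i = 0
--     while i < len(chars):
--         if chars[i].isupper():
--             if i + 1 >= len(chars) or not chars[i + 1].islower():
--                 raise ValueError(
--                     f"Digramme mal formé à la position {i}: "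
--                     f"une majuscule doit être suivie d'une minuscule."
--                 )
--             parsed.append(chars[i] + chars[i + 1])
--             i += 2
--         else:
--             parsed.append(chars[i])
--             i += 1
--
--     if len(parsed) != size * size:
--         raise ValueError(
--             f"Nombre de tuiles incorrect : "
--             f"attendu {size*size}, obtenu {len(parsed)}."
--         )
--
--     matrix: List[List[str]] = []
--     for row in range(size):
--         start = row * size
--         matrix.append([parsed[start + col].upper() for col in range(size)])
--     return matrix
-- ===== SOURCE B (Python) =====
-- from typing import List
--
--
-- def parse_board_chars(chars: str, size: int) -> List[List[str]]:
--     """Single pass: a small state machine over the characters that appends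
--     uppercased tiles straight into the current row and flushes each full row
--     into the matrix, instead of building a flat token list first and then
--     re-slicing it by index arithmetic in a second pass."""
--     matrix: List[List[str]] = []
--     row: List[str] = []
--     pending = None  # an uppercase char waiting for its lowercase partner
--     tiles = 0
--     for ch in chars:
--         if pending is not None:
--             if not ch.islower():
--                 raise ValueError("Digramme mal formé: une majuscule doit être suivie d'une minuscule.")
--             row.append((pending + ch).upper())
--             pending = None
--         elif ch.isupper():
--             pending = ch
--             continue
--         else:
--             row.append(ch.upper())
--         tiles += 1
--         if len(row) == size:
--             matrix.append(row)
--             row = []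
--     if pending is not None:
--         raise ValueError("Digramme mal formé: une majuscule doit être suivie d'une minuscule.")
--     if tiles != size * size:
--         raise ValueError(f"Nombre de tuiles incorrect : attendu {size*size}, obtenu {tiles}.")
--     return matrix
-- ===== Notes on version B (the rewrite author's own statement) =====
-- stated objective: alternative
-- what changed: A tokenizes into a flat list with an index/lookahead while-loop and then re-slices the list into rows by index arithmetic over range(size) in a second pass; B is a single state-machine pass (pending-uppercase state instead of index lookahead) that appends uppercased tiles directly into the current row, flushes full rows into the matrix as it goes, and validates the running tile count at the end.
import Mathlib
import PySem

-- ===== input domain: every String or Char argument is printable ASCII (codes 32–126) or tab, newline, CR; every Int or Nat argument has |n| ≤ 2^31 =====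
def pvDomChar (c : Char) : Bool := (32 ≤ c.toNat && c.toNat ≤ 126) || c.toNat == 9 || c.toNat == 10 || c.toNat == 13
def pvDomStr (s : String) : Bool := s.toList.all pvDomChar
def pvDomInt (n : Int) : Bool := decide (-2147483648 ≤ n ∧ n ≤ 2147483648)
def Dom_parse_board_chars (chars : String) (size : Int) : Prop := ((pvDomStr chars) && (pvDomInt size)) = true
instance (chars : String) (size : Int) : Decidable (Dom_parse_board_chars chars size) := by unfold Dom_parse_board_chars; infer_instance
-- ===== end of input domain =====

-- B restructures A (flat token list, then index-arithmetic re-slicing) into one state-machine pass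
-- that appends uppercased tiles straight into the current row and flushes full rows (objective: alternative).

-- ===== PORT A =====
-- A's while-loop tokenizer: none = the ValueError raise (excluded by Pre_)
def pvScanA : List Char → Option (List String)
  | [] => some []
  | [c] =>
    if PySem.Chars.isupper c then none
    else (pvScanA []).map (fun ts => String.ofList [c] :: ts)
  | c :: c2 :: rest =>
    if PySem.Chars.isupper c then
      if PySem.Chars.islower c2 then (pvScanA rest).map (fun ts => String.ofList [c, c2] :: ts)
      else none
    else (pvScanA (c2 :: rest)).map (fun ts => String.ofList [c] :: ts)

def parse_board_chars (chars : String) (size : Int) : List (List String) :=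
  match pvScanA chars.toList with
  | none => []  -- ValueError "Digramme mal formé" (outside Pre_)
  | some parsed =>
    if (parsed.length : Int) ≠ size * size then []  -- ValueError "Nombre de tuiles incorrect" (outside Pre_)
    else
      (PySem.List.pyRange 0 size 1).map (fun row =>
        (PySem.List.pyRange 0 size 1).map (fun col =>
          PySem.Str.upper (PySem.List.pyGetD parsed (row * size + col) "")))

-- ===== PORT B =====
-- B's single for-loop: state = (matrix, current row, tile count, pending uppercase char); none = ValueError
def pvLoopB (size : Int) (matrix : List (List String)) (row : List String)
    (tiles : Int) (pending : Option Char) : List Char → Option (List (List String) × Int)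
  | [] => match pending with
    | some _ => none
    | none => some (matrix, tiles)
  | c :: rest =>
    match pending with
    | some p =>
      if PySem.Chars.islower c then
        let row' := row ++ [PySem.Str.upper (String.ofList [p, c])]
        if (row'.length : Int) = size then pvLoopB size (matrix ++ [row']) [] (tiles + 1) none rest
        else pvLoopB size matrix row' (tiles + 1) none rest
      else none
    | none =>
      if PySem.Chars.isupper c then pvLoopB size matrix row tiles (some c) rest
      else
        let row' := row ++ [PySem.Str.upper (String.ofList [c])]
        if (row'.length : Int) = size then pvLoopB size (matrix ++ [row']) [] (tiles + 1) none rest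
        else pvLoopB size matrix row' (tiles + 1) none rest

def parse_board_chars_alt (chars : String) (size : Int) : List (List String) :=
  match pvLoopB size [] [] 0 none chars.toList with
  | none => []  -- ValueError "Digramme mal formé" (outside Pre_)
  | some (matrix, tiles) =>
    if tiles ≠ size * size then []  -- ValueError "Nombre de tuiles incorrect" (outside Pre_)
    else matrix

-- ===== PRECONDITION & SPEC =====
-- Pre_ excludes exactly the inputs on which A raises ValueError: a malformed digraph
-- (an uppercase not followed by a lowercase) or a tile count different from size*size.
def Pre_parse_board_chars (chars : String) (size : Int) : Prop :=
  (∀ i < chars.toList.length, PySem.Chars.isupper (chars.toList.getD i '\x00') = true →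
      PySem.Chars.islower (chars.toList.getD i.succ '\x00') = true) ∧
  (chars.toList.length : Int) - (chars.toList.countP (fun c => PySem.Chars.isupper c) : Int) = size * size

instance (chars : String) (size : Int) : Decidable (Pre_parse_board_chars chars size) := by
  unfold Pre_parse_board_chars; infer_instance

def pvWitness_parse_board_chars : String × Int := ("abQucdw ~f", 3)

def Spec_parse_board_chars (chars : String) (size : Int) (out : List (List String)) : Prop := out = parse_board_chars_alt chars size
instance (chars : String) (size : Int) (out : List (List String)) : Decidable (Spec_parse_board_chars chars size out) := by unfold Spec_parse_board_chars; infer_instance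

-- ===== CLAIM (what is proved, stated in full; the proofs are below) =====
def Claim_equal_parse_board_chars : Prop := ∀ (chars : String) (size : Int), Dom_parse_board_chars chars size → Pre_parse_board_chars chars size → Spec_parse_board_chars chars size (parse_board_chars chars size)

-- ===== LEMMAS AND PROOFS =====

-- the "every uppercase is followed by a lowercase" condition, as a predicate on char lists
def pvGood (l : List Char) : Prop :=
  ∀ i < l.length, PySem.Chars.isupper (l.getD i '\x00') = true →
      PySem.Chars.islower (l.getD i.succ '\x00') = true

-- reference tokenizer (total; agrees with A's scan on good inputs)
def pvTok : List Char → List String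
  | [] => []
  | [c] => if PySem.Chars.isupper c then [] else [String.ofList [c]]
  | c :: c2 :: rest =>
    if PySem.Chars.isupper c then String.ofList [c, c2] :: pvTok rest
    else String.ofList [c] :: pvTok (c2 :: rest)

-- reference chunker (B's flush logic, tokens already in hand)
def pvChunkFold (size : Int) (matrix : List (List String)) (row : List String) :
    List String → List (List String) × List String
  | [] => (matrix, row)
  | t :: ts =>
    let row' := row ++ [t]
    if (row'.length : Int) = size then pvChunkFold size (matrix ++ [row']) [] ts
    else pvChunkFold size matrix row' ts

-- exact n-chunking, k rows
def pvRows (n : Nat) : Nat → List String → List (List String)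
  | 0, _ => []
  | k + 1, ts => ts.take n :: pvRows n k (ts.drop n)

theorem pvLower_not_upper {c : Char} (h : PySem.Chars.islower c = true) :
    PySem.Chars.isupper c = false := by
  simp [PySem.Chars.islower, Char.le_def, UInt32.le_iff_toNat_le] at h
  simp [PySem.Chars.isupper, Char.le_def, UInt32.le_iff_toNat_le]
  omega

theorem pvGood_tail {a : Char} {l : List Char} (h : pvGood (a :: l)) : pvGood l := by
  intro i hi hup
  have := h (i + 1) (by simpa using Nat.succ_lt_succ hi) (by simpa using hup)
  simpa using this

theorem pvGood_head_up {c : Char} {l : List Char} (h : pvGood (c :: l))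
    (hc : PySem.Chars.isupper c = true) :
    ∃ c2 r2, l = c2 :: r2 ∧ PySem.Chars.islower c2 = true := by
  have h0 := h 0 (by simp) (by simpa using hc)
  cases l with
  | nil => simp [PySem.Chars.islower, Char.le_def] at h0
  | cons c2 r2 => exact ⟨c2, r2, rfl, by simpa using h0⟩

theorem pvScanA_good {l : List Char} (h : pvGood l) : pvScanA l = some (pvTok l) := by
  fun_induction pvTok l with
  | case1 => simp [pvScanA]
  | case2 c hc =>
    obtain ⟨c2, r2, heq, _⟩ := pvGood_head_up h hc
    exact absurd heq (by simp)
  | case3 c hc => simp [pvScanA, hc]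
  | case4 c c2 rest hc ih =>
    obtain ⟨c2', r2', heq, hlow⟩ := pvGood_head_up h hc
    rw [List.cons.injEq] at heq
    obtain ⟨h1, h2⟩ := heq
    subst h1; subst h2
    have hg : pvGood rest := pvGood_tail (pvGood_tail h)
    simp [pvScanA, hc, hlow, ih hg]
  | case5 c c2 rest hc ih =>
    simp [pvScanA, hc, ih (pvGood_tail h)]

theorem pvTok_length {l : List Char} (h : pvGood l) :
    (pvTok l).length + l.countP (fun c => PySem.Chars.isupper c) = l.length := by
  fun_induction pvTok l with
  | case1 => simp
  | case2 c hc =>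
    obtain ⟨c2, r2, heq, _⟩ := pvGood_head_up h hc
    exact absurd heq (by simp)
  | case3 c hc => simp [hc]
  | case4 c c2 rest hc ih =>
    obtain ⟨c2', r2', heq, hlow⟩ := pvGood_head_up h hc
    rw [List.cons.injEq] at heq
    obtain ⟨h1, h2⟩ := heq
    subst h1; subst h2
    have := ih (pvGood_tail (pvGood_tail h))
    simp [List.countP_cons, hc, pvLower_not_upper hlow] at *
    omega
  | case5 c c2 rest hc ih =>
    have := ih (pvGood_tail h)
    simp [List.countP_cons, hc] at *
    omega

-- B's loop, on good input, is the reference chunker applied to the uppercased tokens,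
-- and its tile counter counts the tokens
theorem pvLoopB_good {l : List Char} (h : pvGood l) (size : Int)
    (matrix : List (List String)) (row : List String) (tiles : Int) :
    pvLoopB size matrix row tiles none l =
      some ((pvChunkFold size matrix row ((pvTok l).map PySem.Str.upper)).1,
            tiles + ((pvTok l).length : Int)) := by
  fun_induction pvTok l generalizing matrix row tiles with
  | case1 => simp [pvLoopB, pvChunkFold]
  | case2 c hc =>
    obtain ⟨c2, r2, heq, _⟩ := pvGood_head_up h hc
    exact absurd heq (by simp)
  | case3 c hc =>
    rw [pvLoopB]
    simp only [hc, Bool.false_eq_true, if_false]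
    simp only [List.map_cons, List.map_nil]
    rw [pvChunkFold]
    split
    all_goals simp [pvLoopB, pvChunkFold]
  | case4 c c2 rest hc ih =>
    obtain ⟨c2', r2', heq, hlow⟩ := pvGood_head_up h hc
    rw [List.cons.injEq] at heq
    obtain ⟨h1, h2⟩ := heq
    subst h1; subst h2
    have hg : pvGood rest := pvGood_tail (pvGood_tail h)
    rw [pvLoopB]
    simp only [hc, if_true]
    rw [pvLoopB]
    simp only [hlow, if_true, List.map_cons]
    rw [pvChunkFold]
    split
    · rw [ih hg]; simp [pvChunkFold]; ring_nf
    · rw [ih hg]; simp [pvChunkFold]; ring_nf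
  | case5 c c2 rest hc ih =>
    have hg : pvGood (c2 :: rest) := pvGood_tail h
    rw [pvLoopB]
    simp only [hc, Bool.false_eq_true, if_false, List.map_cons]
    rw [pvChunkFold]
    split
    · rw [ih hg]; simp [pvChunkFold]; ring_nf
    · rw [ih hg]; simp [pvChunkFold]; ring_nf

-- with a negative size a row is never full, so nothing is ever flushed
theorem pvChunkFold_neg (size : Int) (hsz : size < 0) (ts : List String) :
    ∀ (matrix : List (List String)) (row : List String),
      (pvChunkFold size matrix row ts).1 = matrix := by
  induction ts with
  | nil => intro matrix row; simp [pvChunkFold]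
  | cons t ts ih =>
    intro matrix row
    rw [pvChunkFold]
    have : ¬ (((row ++ [t]).length : Int) = size) := by simp; omega
    simp only [this, if_false]
    exact ih _ _

-- consuming enough tokens to finish the current row
theorem pvChunkFold_fill (n : Nat) (hn : 0 < n) (ts : List String) :
    ∀ (row : List String) (matrix : List (List String)), row.length < n →
      n ≤ row.length + ts.length →
      pvChunkFold (n : Int) matrix row ts =
        pvChunkFold (n : Int) (matrix ++ [row ++ ts.take (n - row.length)]) []
          (ts.drop (n - row.length)) := by
  induction ts with
  | nil => intro row matrix h1 h2; simp at h2; omega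
  | cons t ts ih =>
    intro row matrix h1 h2
    by_cases hfull : row.length + 1 = n
    · have h3 : n - row.length = 1 := by omega
      simp [pvChunkFold, h3, hfull]
    · have h3 : ((row ++ [t]).length : Int) ≠ (n : Int) := by
        simp; omega
      have h4 : n - row.length = (n - (row ++ [t]).length) + 1 := by simp; omega
      rw [pvChunkFold]
      simp only [h3, if_false]
      rw [ih (row ++ [t]) matrix (by simp; omega) (by simp at h2 ⊢; omega)]
      rw [h4]
      simp [List.take_succ_cons, List.drop_succ_cons]

theorem pvChunkFold_rows (n : Nat) :
    ∀ (k : Nat) (ts : List String) (matrix : List (List String)),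
      ts.length = k * n → (0 < n ∨ k = 0) →
      pvChunkFold (n : Int) matrix [] ts = (matrix ++ pvRows n k ts, []) := by
  intro k
  induction k with
  | zero =>
    intro ts matrix hlen _
    have : ts = [] := by simpa using hlen
    subst this; simp [pvChunkFold, pvRows]
  | succ k ih =>
    intro ts matrix hlen hn
    have hn : 0 < n := by omega
    rw [pvChunkFold_fill n hn ts [] matrix (by simpa using hn)
      (by simp [hlen, Nat.succ_mul])]
    simp only [List.nil_append, List.length_nil, Nat.sub_zero]
    rw [ih (ts.drop n) _ (by simp [hlen, Nat.succ_mul]) (Or.inl hn)]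
    simp [pvRows]

theorem pvRows_length (n k : Nat) (ts : List String) : (pvRows n k ts).length = k := by
  induction k generalizing ts with
  | zero => simp [pvRows]
  | succ k ih => simp [pvRows, ih]

theorem pvRows_getElem (n k : Nat) (ts : List String) (r : Nat) (hr : r < k) :
    (pvRows n k ts)[r]'(by rw [pvRows_length]; exact hr) =
      (ts.drop (r * n)).take n := by
  induction k generalizing ts r with
  | zero => omega
  | succ k ih =>
    cases r with
    | zero => simp [pvRows]
    | succ r =>
      have := ih (ts.drop n) r (by omega)
      simp only [pvRows, List.getElem_cons_succ, this, List.drop_drop]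
      congr 2
      ring

-- A's index-arithmetic matrix equals exact chunking of the uppercased tokens
theorem pvMatrixA_eq_rows (ps : List String) (n : Nat) (hlen : ps.length = n * n) :
    (PySem.List.pyRange 0 (n : Int) 1).map (fun row =>
        (PySem.List.pyRange 0 (n : Int) 1).map (fun col =>
          PySem.Str.upper (PySem.List.pyGetD ps (row * (n : Int) + col) ""))) =
      pvRows n n (ps.map PySem.Str.upper) := by
  apply List.ext_getElem
  · simp [PySem.List.length_pyRange_one, pvRows_length]
  · intro r h1 h2
    have hr : r < n := by simpa [PySem.List.length_pyRange_one] using h1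
    have key : r * n + n ≤ n * n := by
      have h5 := Nat.mul_le_mul_right n (show r + 1 ≤ n by omega)
      calc r * n + n = (r + 1) * n := by ring
        _ ≤ n * n := h5
    rw [List.getElem_map, PySem.List.getElem_pyRange_one, pvRows_getElem n n _ r hr]
    apply List.ext_getElem
    · simp [PySem.List.length_pyRange_one, hlen]
      omega
    · intro c h3 h4
      have hcn : c < n := by simpa [PySem.List.length_pyRange_one] using h3
      have hidx : r * n + c < ps.length := by simp [hlen]; omega
      rw [List.getElem_map, PySem.List.getElem_pyRange_one]
      rw [List.getElem_take, List.getElem_drop, List.getElem_map]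
      congr 1
      have hcast : (0 + (r : Int)) * (n : Int) + (0 + (c : Int)) = ((r * n + c : Nat) : Int) := by
        push_cast; ring
      rw [hcast, PySem.List.pyGetD_natCast, List.getD_eq_getElem ps "" hidx]

-- ===== VERDICT (by name: the statement is the Claim_ definition above) =====
theorem parse_board_chars_spec : Claim_equal_parse_board_chars := by
  intro chars size hdom hpre
  obtain ⟨hgood0, hcount⟩ := hpre
  have hgood : pvGood chars.toList := hgood0
  have h1 := pvTok_length hgood
  unfold Spec_parse_board_chars parse_board_chars parse_board_chars_alt
  rw [pvScanA_good hgood, pvLoopB_good hgood]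
  have hcond : ¬ (((pvTok chars.toList).length : Int) ≠ size * size) := by
    push_cast; omega
  have htiles : ¬ ((0 : Int) + ((pvTok chars.toList).length : Int) ≠ size * size) := by
    push_cast; omega
  by_cases hsz : 0 ≤ size
  · obtain ⟨n, rfl⟩ : ∃ n : Nat, size = (n : Int) := ⟨size.toNat, (Int.toNat_of_nonneg hsz).symm⟩
    have hps : (pvTok chars.toList).length = n * n := by
      have h2 : ((pvTok chars.toList).length : Int) = (n : Int) * (n : Int) := by omega
      exact_mod_cast h2
    have hrw := pvChunkFold_rows n n ((pvTok chars.toList).map PySem.Str.upper) []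
      (by simpa using hps) (by omega)
    rw [hrw]
    simp only [List.nil_append, if_neg hcond, if_neg htiles]
    rw [pvMatrixA_eq_rows _ n hps]
  · have hneg : size < 0 := by omega
    simp only [if_neg hcond, if_neg htiles]
    rw [pvChunkFold_neg size hneg]
    rw [PySem.List.pyRange_one_eq_nil (by omega)]
    simp
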